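-- pv_equiv track=rewrite | github.com/kgateway-dev/kgateway.dev | scripts/generate-shared-types.py | format_go_type_as_link
-- ===== SOURCE A (Python) =====
-- def format_go_type_as_link(go_type: str) -> str:
--     """Convert a Go type to markdown with links to other types."""
--     # Handle slices
--     if go_type.startswith("[]"):
--         inner = go_type[2:]
--         return f"[]{format_go_type_as_link(inner)}"
--
--     # Handle pointers
--     if go_type.startswith("*"):
--         inner = go_type[1:]
--         return f"*{format_go_type_as_link(inner)}"
--
--     # Handle maps
--     if go_type.startswith("map["):
--         return go_type  # Keep maps as-is for simplicity
--
--     # Check if it's a custom type (starts with uppercase, not a builtin)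
--     builtins = {"string", "int", "int32", "int64", "bool", "float32", "float64", "byte", "error"}
--     if go_type and go_type[0].isupper() and go_type.lower() not in builtins:
--         # Check for package prefix
--         if "." in go_type:
--             parts = go_type.split(".")
--             type_name = parts[-1]
--             return f"[{go_type}](#{type_name.lower()})"
--         return f"[{go_type}](#{go_type.lower()})"
--
--     return go_type
-- ===== SOURCE B (Python) =====
-- _GO_BUILTINS = ("string", "int", "int32", "int64", "bool", "float32", "float64", "byte", "error")
--
--
-- def format_go_type_as_link(go_type: str) -> str:
--     """Convert a Go type to markdown with links to other types."""
--     # Scan an index past the slice/pointer prefix instead of recursing on slices.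
--     i, n = 0, len(go_type)
--     while i < n:
--         if go_type.startswith("[]", i):
--             i += 2
--         elif go_type[i] == "*":
--             i += 1
--         else:
--             break
--     base = go_type[i:]
--     if base.startswith("map["):
--         return go_type
--     if not base or not base[0].isupper() or base.lower() in _GO_BUILTINS:
--         return go_type
--     anchor = base.rpartition(".")[2].lower()
--     return go_type[:i] + "[" + base + "](#" + anchor + ")"
-- ===== Notes on version B (the rewrite author's own statement) =====
-- stated objective: simpler
-- what changed: Replaces A's prefix-stripping recursion with an index scan that locates where the base type starts, returns the input unchanged early for the map/builtin/non-custom cases (no prefix re-assembly), and takes the anchor with str.rpartition on the dot instead of branching on whether a dot is present and splitting.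
import Mathlib
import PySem

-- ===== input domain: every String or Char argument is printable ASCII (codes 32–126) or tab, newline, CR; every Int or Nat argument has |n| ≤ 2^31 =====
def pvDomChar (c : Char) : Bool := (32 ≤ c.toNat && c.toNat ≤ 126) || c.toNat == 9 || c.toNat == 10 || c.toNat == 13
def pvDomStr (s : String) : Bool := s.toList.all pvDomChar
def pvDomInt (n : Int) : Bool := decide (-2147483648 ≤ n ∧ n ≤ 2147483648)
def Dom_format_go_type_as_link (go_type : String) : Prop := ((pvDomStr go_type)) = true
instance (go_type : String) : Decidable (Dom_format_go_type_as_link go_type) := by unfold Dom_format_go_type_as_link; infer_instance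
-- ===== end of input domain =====

-- B replaces A's prefix-stripping recursion with an index scan past the slice/pointer prefix,
-- early returns of the unchanged input for non-link cases, and rpartition('.') for the anchor (objective: simpler).

-- ===== PORT A =====
-- the builtins set literal from A
def pvBuiltinsA : List (List Char) :=
  ["string".toList, "int".toList, "int32".toList, "int64".toList, "bool".toList,
   "float32".toList, "float64".toList, "byte".toList, "error".toList]

-- the map/custom-type/plain tail of A's body, on List Char
def pvBaseA (cs : List Char) : List Char :=
  if PySem.Chars.startswith cs "map[".toList then cs
  else if !cs.isEmpty && PySem.Chars.isupper (cs.headD ' ')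
          && !(pvBuiltinsA.contains (PySem.Chars.lower cs)) then
    if PySem.Chars.isIn ['.'] cs then
      let parts := PySem.Chars.splitOn cs ['.']
      let type_name := PySem.List.pyGetD parts (-1) []
      '[' :: cs ++ ']' :: '(' :: '#' :: PySem.Chars.lower type_name ++ [')']
    else
      '[' :: cs ++ ']' :: '(' :: '#' :: PySem.Chars.lower cs ++ [')']
  else cs

-- A's recursion, on List Char
def pvFmtA (cs : List Char) : List Char :=
  if h1 : PySem.Chars.startswith cs ('['::']'::[]) then
    '[' :: ']' :: pvFmtA (cs.drop 2)
  else if h2 : PySem.Chars.startswith cs ('*'::[]) then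
    '*' :: pvFmtA (cs.drop 1)
  else pvBaseA cs
termination_by cs.length
decreasing_by
  · rw [PySem.Chars.startswith_iff] at h1
    have := h1.length_le; simp at this ⊢; omega
  · rw [PySem.Chars.startswith_iff] at h2
    have := h2.length_le; simp at this ⊢; omega

def format_go_type_as_link (go_type : String) : String :=
  String.ofList (pvFmtA go_type.toList)

-- ===== PORT B =====
-- B's builtins tuple
def pvGoBuiltins : List (List Char) :=
  ["string".toList, "int".toList, "int32".toList, "int64".toList, "bool".toList,
   "float32".toList, "float64".toList, "byte".toList, "error".toList]

-- B's index loop: how many characters the `while` advances `i` past (the `i < n` guard is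
-- subsumed: startswith at the end is false and `go_type[i] == '*'` cannot fire on the empty rest).
def pvSkipB (cs : List Char) : Nat :=
  if h1 : PySem.Chars.startswith cs ('['::']'::[]) then
    2 + pvSkipB (cs.drop 2)
  else if h2 : PySem.Chars.startswith cs ('*'::[]) then
    1 + pvSkipB (cs.drop 1)
  else 0
termination_by cs.length
decreasing_by
  · rw [PySem.Chars.startswith_iff] at h1
    have := h1.length_le; simp at this ⊢; omega
  · rw [PySem.Chars.startswith_iff] at h2
    have := h2.length_le; simp at this ⊢; omega

-- base.rpartition(".")[2]: the suffix after the last '.', or base itself if '.' is absent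
-- (exact for Python's rpartition third component).
def pvRPartTail (cs : List Char) : List Char :=
  (cs.reverse.takeWhile (fun c => c ≠ '.')).reverse

def format_go_type_as_link_alt (go_type : String) : String :=
  let cs := go_type.toList
  let i := pvSkipB cs
  let base := cs.drop i        -- go_type[i:]
  if PySem.Chars.startswith base "map[".toList then go_type
  else if base.isEmpty || !PySem.Chars.isupper (base.headD ' ')
          || pvGoBuiltins.contains (PySem.Chars.lower base) then go_type
  else
    let anchor := PySem.Chars.lower (pvRPartTail base)
    String.ofList (cs.take i ++ '[' :: base ++ "](#".toList ++ anchor ++ [')'])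

-- ===== PRECONDITION & SPEC =====
def Spec_format_go_type_as_link (go_type : String) (out : String) : Prop := out = format_go_type_as_link_alt go_type
instance (go_type : String) (out : String) : Decidable (Spec_format_go_type_as_link go_type out) := by unfold Spec_format_go_type_as_link; infer_instance

-- ===== CLAIM =====
def Claim_equal_format_go_type_as_link : Prop := ∀ (go_type : String), Dom_format_go_type_as_link go_type → Spec_format_go_type_as_link go_type (format_go_type_as_link go_type)

-- ===== LEMMAS AND PROOFS =====

theorem pvIsIn_singleton (c : Char) (l : List Char) : PySem.Chars.isIn [c] l = true ↔ c ∈ l := by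
  rw [← not_iff_not, Bool.not_eq_true, PySem.Chars.isIn_eq_false_iff, List.singleton_infix_iff]

theorem pvRPartTail_no_dot (cs : List Char) (h : '.' ∉ cs) : pvRPartTail cs = cs := by
  unfold pvRPartTail
  rw [List.takeWhile_eq_self_iff.mpr, List.reverse_reverse]
  intro x hx
  simp only [ne_eq, decide_eq_true_eq]
  rintro rfl
  exact h (List.mem_reverse.mp hx)

theorem pvRPartTail_cons (c : Char) (rest : List Char) :
    pvRPartTail (c :: rest) =
      if '.' ∈ rest then pvRPartTail rest else if c = '.' then rest else c :: rest := by
  unfold pvRPartTail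
  rw [List.reverse_cons, List.takeWhile_append]
  by_cases hd : '.' ∈ rest
  · have hne : ¬ (rest.reverse.takeWhile (fun x => !decide (x = '.'))).length = rest.length := by
      intro hlen
      have hlen' : (rest.reverse.takeWhile (fun x => !decide (x = '.'))).length = rest.reverse.length := by
        simpa using hlen
      have heq := (List.takeWhile_prefix _).eq_of_length hlen'
      have := List.takeWhile_eq_self_iff.mp heq '.' (List.mem_reverse.mpr hd)
      simp at this
    simp [hne, hd]
  · have heq : rest.reverse.takeWhile (fun x => decide (x ≠ '.')) = rest.reverse :=
      List.takeWhile_eq_self_iff.mpr (by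
        intro x hx
        simp only [ne_eq, decide_eq_true_eq]
        rintro rfl
        exact hd (List.mem_reverse.mp hx))
    rw [heq]
    simp only [List.length_reverse, if_true, hd, if_false]
    by_cases hc : c = '.'
    · subst hc; simp [List.takeWhile]
    · simp [List.takeWhile, hc]

-- last element produced by splitOn's worker
set_option maxRecDepth 4000 in
theorem pvGoLast : ∀ (l : List Char) (fuel : Nat) (cur : List Char) (acc : List (List Char)),
    l.length < fuel →
    ∃ pre, PySem.Chars.splitOn.go ['.'] fuel l cur acc =
      ((if '.' ∈ l then pvRPartTail l else cur.reverse ++ l) :: pre).reverse := by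
  intro l
  induction l with
  | nil =>
      intro fuel cur acc hf
      match fuel, hf with
      | fuel+1, _ => exact ⟨acc, by simp [PySem.Chars.splitOn.go]⟩
  | cons c rest ih =>
      intro fuel cur acc hf
      match fuel, hf with
      | fuel+1, hf =>
        by_cases hc : c = '.'
        · subst hc
          obtain ⟨pre, hpre⟩ := ih fuel [] (cur.reverse :: acc) (by simp at hf ⊢; omega)
          refine ⟨pre, ?_⟩
          simp only [PySem.Chars.splitOn.go, List.isPrefixOf, beq_self_eq_true, Bool.true_and,
            List.length_cons, List.length_nil, if_true, List.drop_succ_cons, List.drop_zero]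
          rw [hpre]
          simp [pvRPartTail_cons]
        · obtain ⟨pre, hpre⟩ := ih fuel (c :: cur) acc (by simp at hf ⊢; omega)
          refine ⟨pre, ?_⟩
          have hb : ('.' == c) = false := by
            simp only [beq_eq_false_iff_ne, ne_eq]
            exact fun h => hc h.symm
          simp only [PySem.Chars.splitOn.go, List.isPrefixOf, hb, Bool.false_and]
          rw [hpre]
          by_cases hd : '.' ∈ rest
          · have : '.' ∈ c :: rest := List.mem_cons_of_mem _ hd
            simp [hd, this, pvRPartTail_cons]
          · have hnc : ¬ '.' ∈ c :: rest := by
              simp only [List.mem_cons]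
              rintro (h | h)
              · exact hc h.symm
              · exact hd h
            simp [hd, hnc]
  

theorem pvSplitLast (cs : List Char) :
    PySem.List.pyGetD (PySem.Chars.splitOn cs ['.']) (-1) [] =
      if '.' ∈ cs then pvRPartTail cs else cs := by
  obtain ⟨pre, hpre⟩ := pvGoLast cs (cs.length + 1) [] [] (by omega)
  rw [PySem.Chars.splitOn, hpre]
  simp [PySem.List.pyGetD, PySem.List.pyGet?, PySem.List.pyIdx?]

theorem pvSkip_split (cs : List Char) :
    pvFmtA cs = cs.take (pvSkipB cs) ++ pvBaseA (cs.drop (pvSkipB cs)) := by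
  induction cs using pvFmtA.induct with
  | case1 cs h1 ih =>
      have h1' := h1
      rw [PySem.Chars.startswith_iff] at h1'
      obtain ⟨t, rfl⟩ := h1'
      rw [pvFmtA, pvSkipB]
      simp only [h1, dite_true]
      have hd : List.drop 2 (['[', ']'] ++ t) = t := rfl
      rw [hd] at ih ⊢
      have he : (['[', ']'] ++ t : List Char) = '[' :: ']' :: t := rfl
      rw [he, show (2 + pvSkipB t) = pvSkipB t + 1 + 1 from by omega]
      simp only [List.take_succ_cons, List.drop_succ_cons]
      rw [ih]
      simp
  | case2 cs h1 h2 ih =>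
      have h2' := h2
      rw [PySem.Chars.startswith_iff] at h2'
      obtain ⟨t, rfl⟩ := h2'
      rw [pvFmtA, pvSkipB]
      simp only [h1, h2, dite_true, Bool.false_eq_true, dite_false]
      have hd : List.drop 1 (['*'] ++ t) = t := rfl
      rw [hd] at ih ⊢
      have he : (['*'] ++ t : List Char) = '*' :: t := rfl
      rw [he, show (1 + pvSkipB t) = pvSkipB t + 1 from by omega]
      simp only [List.take_succ_cons, List.drop_succ_cons]
      rw [ih]
      simp
  | case3 cs h1 h2 =>
      rw [pvFmtA, pvSkipB]
      simp [h1, h2]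

-- ===== VERDICT =====
theorem format_go_type_as_link_spec : Claim_equal_format_go_type_as_link := by
  intro s _
  unfold Spec_format_go_type_as_link format_go_type_as_link format_go_type_as_link_alt
  rw [pvSkip_split]
  by_cases hmap : PySem.Chars.startswith (s.toList.drop (pvSkipB s.toList)) "map[".toList
  · simp only [pvBaseA, hmap, if_true]
    rw [List.take_append_drop, String.ofList_toList]
  · by_cases hcust : (!(s.toList.drop (pvSkipB s.toList)).isEmpty
        && PySem.Chars.isupper ((s.toList.drop (pvSkipB s.toList)).headD ' ')
        && !(pvBuiltinsA.contains (PySem.Chars.lower (s.toList.drop (pvSkipB s.toList))))) = true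
    · have hcust' : ((s.toList.drop (pvSkipB s.toList)).isEmpty
          || !PySem.Chars.isupper ((s.toList.drop (pvSkipB s.toList)).headD ' ')
          || pvGoBuiltins.contains (PySem.Chars.lower (s.toList.drop (pvSkipB s.toList)))) = false := by
        simp only [Bool.and_eq_true, Bool.not_eq_true'] at hcust
        rw [hcust.1.1, hcust.1.2, show pvGoBuiltins = pvBuiltinsA from rfl, hcust.2]
        rfl
      simp only [pvBaseA, hmap, Bool.false_eq_true, if_false, hcust, if_true, hcust']
      by_cases hdot : PySem.Chars.isIn ['.'] (s.toList.drop (pvSkipB s.toList))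
      · have hmem : '.' ∈ s.toList.drop (pvSkipB s.toList) := (pvIsIn_singleton _ _).mp hdot
        simp only [hdot, if_true, pvSplitLast, hmem]
        simp [show "](#".toList = [']', '(', '#'] from rfl]
      · have hmem : '.' ∉ s.toList.drop (pvSkipB s.toList) :=
          fun h => hdot ((pvIsIn_singleton _ _).mpr h)
        simp only [hdot, Bool.false_eq_true, if_false]
        rw [pvRPartTail_no_dot _ hmem]
        simp [show "](#".toList = [']', '(', '#'] from rfl]
    · have hcust' : ((s.toList.drop (pvSkipB s.toList)).isEmpty
          || !PySem.Chars.isupper ((s.toList.drop (pvSkipB s.toList)).headD ' ')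
          || pvGoBuiltins.contains (PySem.Chars.lower (s.toList.drop (pvSkipB s.toList)))) = true := by
        rw [show pvGoBuiltins = pvBuiltinsA from rfl]
        revert hcust
        cases (s.toList.drop (pvSkipB s.toList)).isEmpty
          <;> cases PySem.Chars.isupper ((s.toList.drop (pvSkipB s.toList)).headD ' ')
          <;> cases pvBuiltinsA.contains (PySem.Chars.lower (s.toList.drop (pvSkipB s.toList)))
          <;> simp
      simp only [pvBaseA, hmap, Bool.false_eq_true, if_false, hcust, hcust', if_true]
      rw [List.take_append_drop, String.ofList_toList]
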